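-- pv_equiv track=rewrite | github.com/cirosantilli/project-euler-solvers | solvers/278.py | solve
-- ===== SOURCE A (Python) =====
-- def solve(limit: int) -> int:
--     primes = [2]
--     i = 3
--     while i <= limit:
--         is_prime = True
--         for x in primes:
--             if x * x > i:
--                 break
--             if i % x == 0:
--                 is_prime = False
--                 break
--         if is_prime:
--             primes.append(i)
--         i += 2
--
--     total = 0
--     for i in range(len(primes)):
--         for j in range(i + 1, len(primes)):
--             for k in range(j + 1, len(primes)):
--                 p = primes[i]
--                 q = primes[j]
--                 r = primes[k]
--                 total += 2 * p * q * r - p * q - p * r - q * r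
--
--     return total
-- ===== SOURCE B (Python) =====
-- def solve(limit: int) -> int:
--     primes = [2]
--     i = 3
--     while i <= limit:
--         is_prime = True
--         for x in primes:
--             if x * x > i:
--                 break
--             if i % x == 0:
--                 is_prime = False
--                 break
--         if is_prime:
--             primes.append(i)
--         i += 2
--
--     # One pass maintaining elementary symmetric sums e1, e2, e3 of the primes.
--     # Sum over triples p<q<r of (2pqr - pq - pr - qr) = 2*e3 - (n-2)*e2.
--     e1 = e2 = e3 = 0
--     for p in primes:
--         e3 += e2 * p
--         e2 += e1 * p
--         e1 += p
--     return 2 * e3 - (len(primes) - 2) * e2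
-- ===== Notes on version B (the rewrite author's own statement) =====
-- stated objective: faster
-- what changed: Replaces the cubic triple loop over prime triples with a single pass maintaining elementary symmetric sums e1,e2,e3 and the closed form 2*e3 - (n-2)*e2 (prime generation unchanged).
import Mathlib
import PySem

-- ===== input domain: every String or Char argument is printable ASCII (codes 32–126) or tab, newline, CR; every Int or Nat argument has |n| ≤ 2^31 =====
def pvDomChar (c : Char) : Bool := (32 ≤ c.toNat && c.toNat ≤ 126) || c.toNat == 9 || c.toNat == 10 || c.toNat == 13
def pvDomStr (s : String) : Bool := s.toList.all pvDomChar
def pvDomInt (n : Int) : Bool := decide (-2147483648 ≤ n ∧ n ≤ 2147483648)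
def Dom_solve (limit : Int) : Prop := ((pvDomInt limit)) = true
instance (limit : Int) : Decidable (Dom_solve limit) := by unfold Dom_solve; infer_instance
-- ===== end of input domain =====

-- B replaces A's cubic loop over prime triples by a single pass maintaining the
-- elementary symmetric sums e1,e2,e3 and the closed form 2*e3 - (n-2)*e2 (faster;
-- the prime-generation loop is unchanged and is a shared helper of both ports).

-- ===== PORT A =====
-- shared helper (identical code in Source A and Source B): the inner 'for x in primes' trial loop
def pvTrial (i : Int) : List Int → Bool
  | [] => true
  | x :: xs =>
    if x * x > i then true
    else if PySem.Int.mod i x = 0 then false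
    else pvTrial i xs

-- shared helper (identical code in Source A and Source B): the 'while i <= limit' loop
def pvBuildPrimes (limit i : Int) (primes : List Int) : List Int :=
  if _h : i ≤ limit then
    pvBuildPrimes limit (i + 2) (if pvTrial i primes then primes ++ [i] else primes)
  else primes
termination_by (limit + 1 - i).toNat
decreasing_by omega

def solve (limit : Int) : Int :=
  let primes := pvBuildPrimes limit 3 [2]
  let n : Int := (primes.length : Int)
  (PySem.List.pyRange 0 n 1).foldl (fun total i =>
    (PySem.List.pyRange (i + 1) n 1).foldl (fun total j =>
      (PySem.List.pyRange (j + 1) n 1).foldl (fun total k =>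
        let p := PySem.List.pyGetD primes i 0
        let q := PySem.List.pyGetD primes j 0
        let r := PySem.List.pyGetD primes k 0
        total + (2 * p * q * r - p * q - p * r - q * r)) total) total) 0

-- ===== PORT B =====
def solve_alt (limit : Int) : Int :=
  let primes := pvBuildPrimes limit 3 [2]
  let s := primes.foldl
    (fun (s : Int × Int × Int) p => (s.1 + p, s.2.1 + s.1 * p, s.2.2 + s.2.1 * p))
    (0, 0, 0)
  2 * s.2.2 - ((primes.length : Int) - 2) * s.2.1

-- ===== PRECONDITION & SPEC =====
def Spec_solve (limit : Int) (out : Int) : Prop := out = solve_alt limit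
instance (limit : Int) (out : Int) : Decidable (Spec_solve limit out) := by unfold Spec_solve; infer_instance

-- ===== CLAIM (what is proved, stated in full; the proofs are below) =====
def Claim_equal_solve : Prop := ∀ (limit : Int), Dom_solve limit → Spec_solve limit (solve limit)

-- ===== LEMMAS AND PROOFS =====

-- elementary symmetric sums e1, e2, e3 of a list
def pvE1 : List Int → Int
  | [] => 0
  | p :: t => p + pvE1 t

def pvE2 : List Int → Int
  | [] => 0
  | p :: t => p * pvE1 t + pvE2 t

def pvE3 : List Int → Int
  | [] => 0
  | p :: t => p * pvE2 t + pvE3 t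

-- sum of F x xs over the "head + tail" decompositions of a list
def pvG (F : Int → List Int → Int) : List Int → Int
  | [] => 0
  | x :: xs => F x xs + pvG F xs

def pvg (p q r : Int) : Int := 2 * p * q * r - p * q - p * r - q * r

-- an index loop 'for k in range(j, len(l))' whose body adds F l[k] (l.drop (k+1)) equals t + pvG F (l.drop j)
theorem pv_foldIdx (l : List Int) (body : Int → Int → Int) (F : Int → List Int → Int)
    (hbody : ∀ (t k : Int), 0 ≤ k → k < (l.length : Int) →
      body t k = t + F (PySem.List.pyGetD l k 0) (l.drop (k.toNat + 1)))
    (j t : Int) (hj : 0 ≤ j) :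
    (PySem.List.pyRange j (l.length : Int) 1).foldl body t = t + pvG F (l.drop j.toNat) := by
  by_cases h : (l.length : Int) ≤ j
  · rw [PySem.List.pyRange_one_eq_nil h, List.drop_eq_nil_of_le (by omega)]
    simp [pvG]
  · rw [not_le] at h
    rw [PySem.List.pyRange_one_cons h]
    simp only [List.foldl_cons]
    rw [hbody t j hj h, pv_foldIdx l body F hbody (j + 1) _ (by omega)]
    have hlt : j.toNat < l.length := by omega
    have hd : l.drop j.toNat = l[j.toNat] :: l.drop (j.toNat + 1) :=
      (List.getElem_cons_drop hlt).symm
    have h1 : (j + 1).toNat = j.toNat + 1 := by omega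
    rw [PySem.List.pyGetD_eq_getElem l 0 hj h, h1, hd]
    simp [pvG]
    ring
termination_by ((l.length : Int) - j).toNat
decreasing_by omega

theorem pvG3_eq (p q : Int) (l : List Int) :
    pvG (fun r _ => pvg p q r) l
      = 2 * p * q * pvE1 l - (l.length : Int) * (p * q) - (p + q) * pvE1 l := by
  induction l with
  | nil => simp [pvG, pvE1]
  | cons x xs ih =>
    simp only [pvG, pvE1, List.length_cons]
    rw [ih]
    simp only [pvg]
    push_cast
    ring

theorem pvG2_eq (p : Int) (l : List Int) :
    pvG (fun q rest => pvG (fun r _ => pvg p q r) rest) l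
      = 2 * p * pvE2 l - ((l.length : Int) - 1) * p * pvE1 l - pvE2 l := by
  induction l with
  | nil => simp [pvG, pvE1, pvE2]
  | cons x xs ih =>
    simp only [pvG, pvE1, pvE2, List.length_cons]
    rw [pvG3_eq, ih]
    push_cast
    ring

theorem pvG1_eq (l : List Int) :
    pvG (fun p rest => pvG (fun q rest2 => pvG (fun r _ => pvg p q r) rest2) rest) l
      = 2 * pvE3 l - ((l.length : Int) - 2) * pvE2 l := by
  induction l with
  | nil => simp [pvG, pvE2, pvE3]
  | cons x xs ih =>
    simp only [pvG, pvE2, pvE3, List.length_cons]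
    rw [pvG2_eq, ih]
    push_cast
    ring

theorem pv_foldE (l : List Int) : ∀ (x y z : Int),
    l.foldl (fun (s : Int × Int × Int) p => (s.1 + p, s.2.1 + s.1 * p, s.2.2 + s.2.1 * p)) (x, y, z)
      = (x + pvE1 l, y + x * pvE1 l + pvE2 l, z + y * pvE1 l + x * pvE2 l + pvE3 l) := by
  induction l with
  | nil => intro x y z; simp [pvE1, pvE2, pvE3]
  | cons p t ih =>
    intro x y z
    simp only [List.foldl_cons, ih, pvE1, pvE2, pvE3, Prod.mk.injEq]
    refine ⟨by ring, by ring, by ring⟩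

-- A's triple index loop computes pvG of the nested pair sums
theorem pv_tripleLoop (l : List Int) :
    (PySem.List.pyRange 0 (l.length : Int) 1).foldl (fun total i =>
      (PySem.List.pyRange (i + 1) (l.length : Int) 1).foldl (fun total j =>
        (PySem.List.pyRange (j + 1) (l.length : Int) 1).foldl (fun total k =>
          total + pvg (PySem.List.pyGetD l i 0) (PySem.List.pyGetD l j 0) (PySem.List.pyGetD l k 0)) total) total) 0
      = pvG (fun p rest => pvG (fun q rest2 => pvG (fun r _ => pvg p q r) rest2) rest) l := by
  have h := pv_foldIdx l _
    (fun p rest => pvG (fun q rest2 => pvG (fun r _ => pvg p q r) rest2) rest)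
    (fun t i hi hilt => by
      exact pv_foldIdx l _
        (fun q rest2 => pvG (fun r _ => pvg (PySem.List.pyGetD l i 0) q r) rest2)
        (fun t j hj hjlt => by
          exact pv_foldIdx l _
            (fun r _ => pvg (PySem.List.pyGetD l i 0) (PySem.List.pyGetD l j 0) r)
            (fun t k hk hklt => rfl)
            (j + 1) t (by omega) |>.trans (by rw [show (j + 1).toNat = j.toNat + 1 by omega]))
        (i + 1) t (by omega) |>.trans (by rw [show (i + 1).toNat = i.toNat + 1 by omega]))
    0 0 (le_refl 0)
  simpa using h

-- ===== VERDICT (by name: the statement is the Claim_ definition above) =====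
theorem solve_spec : Claim_equal_solve := by
  intro limit _
  unfold Spec_solve solve solve_alt
  simp only []
  rw [pv_foldE (pvBuildPrimes limit 3 [2]) 0 0 0]
  have h := pv_tripleLoop (pvBuildPrimes limit 3 [2])
  have h2 := pvG1_eq (pvBuildPrimes limit 3 [2])
  simp only [pvg] at h h2
  rw [h, h2]
  ring
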